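-- pv_equiv track=rewrite | github.com/sergiMagret/minimax-othello | othello.py | reorderMoves
-- ===== SOURCE A (Python) =====
-- def isCorner(x, y):
--     # Check if a position is in any of the board's corners
--     if x == 0 and y == 0:  # Top left corner
--         return True
--     elif x == 0 and y == 7:  # Top right corner
--         return True
--     elif x == 7 and y == 0:  # Bottom left corner
--         return True
--     elif x == 7 and y == 7:  # Bottom right corner
--         return True
--     else:
--         return False
--
-- def isC(x, y):
--     # Check if the position [x,y] is a C as marked below
--     #   0 1 2 3 4 5 6 7
--     # 0 . C . . . . C .
--     # 1 C X . . . . X C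
--     # 2 . . . . . . . .
--     # 3 . . . . . . . .
--     # 4 . . . . . . . .
--     # 5 . . . . . . . .
--     # 6 C X . . . . X C
--     # 7 . C . . . . C .
--     if y == 0 and (x == 1 or x == 6):
--         return True
--     elif y == 1 and (x == 0 or x == 7):
--         return True
--     elif y == 6 and (x == 0 or x == 7):
--         return True
--     elif y == 7 and (x == 1 or x == 6):
--         return True
--     else:
--         return False
--
-- def isX(x, y):
--     # Check if the position [x,y] is an X as marked below
--     #   0 1 2 3 4 5 6 7
--     # 0 . C . . . . C .
--     # 1 C X . . . . X C
--     # 2 . . . . . . . .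
--     # 3 . . . . . . . .
--     # 4 . . . . . . . .
--     # 5 . . . . . . . .
--     # 6 C X . . . . X C
--     # 7 . C . . . . C .
--     if y == 1 and (x == 1 or x == 6):
--         return True
--     elif y == 6 and (x == 1 or x == 6):
--         return True
--     else:
--         return False
--
-- def reorderMoves(moves_ordered):
--     # Reorder the moves in <moves_ordered> so the it's in the next order: [corners, other_tiles, cs, xs]
--     # It's sorted form most important moves to less important moves
--     corners = []
--     xs = []
--     cs = []
--     others = []
--     for i in range(len(moves_ordered)):
--         x, y = moves_ordered[i]
--         if isCorner(x, y):
--             corners.append((x, y))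
--         elif isC(x, y):
--             cs.append((x, y))
--         elif isX(x, y):
--             xs.append((x, y))
--         else:
--             others.append((x, y))
--
--     corners.extend(others)
--     corners.extend(cs)
--     corners.extend(xs)
--
--     return corners
-- ===== SOURCE B (Python) =====
-- def _priority(move):
--     # 0 = corner, 1 = ordinary square, 2 = C-square, 3 = X-square
--     x, y = move
--     edge = (0, 7)
--     near = (1, 6)
--     if x in edge and y in edge:
--         return 0
--     if (x in near and y in edge) or (x in edge and y in near):
--         return 2
--     if x in near and y in near:
--         return 3
--     return 1
--
--
-- def reorderMoves(moves_ordered):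
--     # Stable sort by positional priority: ties keep their original order,
--     # so each bucket appears in the input order, buckets from best to worst.
--     return sorted(((x, y) for x, y in moves_ordered), key=_priority)
-- ===== Notes on version B (the rewrite author's own statement) =====
-- stated objective: simpler
-- what changed: Replaces the four-accumulator partition loop and three extend calls with a single stable sort keyed on a positional-priority function (0 corner, 1 ordinary, 2 C-square, 3 X-square).
import Mathlib
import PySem

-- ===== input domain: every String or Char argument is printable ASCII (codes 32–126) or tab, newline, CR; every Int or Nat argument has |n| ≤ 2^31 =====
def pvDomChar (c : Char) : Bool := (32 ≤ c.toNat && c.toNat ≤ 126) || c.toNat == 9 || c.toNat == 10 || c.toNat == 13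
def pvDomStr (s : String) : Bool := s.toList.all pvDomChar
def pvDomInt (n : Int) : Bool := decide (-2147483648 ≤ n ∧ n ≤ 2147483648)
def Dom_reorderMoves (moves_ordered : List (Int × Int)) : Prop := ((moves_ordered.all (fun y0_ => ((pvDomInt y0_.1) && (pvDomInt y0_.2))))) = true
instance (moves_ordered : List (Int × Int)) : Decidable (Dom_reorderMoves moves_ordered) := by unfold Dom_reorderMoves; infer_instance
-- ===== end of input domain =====

-- B replaces A's four-bucket partition loop by one stable sort keyed on a positional priority (simpler; not faster).


-- ===== PORT A =====
def isCorner (x y : Int) : Bool :=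
  if x = 0 ∧ y = 0 then true
  else if x = 0 ∧ y = 7 then true
  else if x = 7 ∧ y = 0 then true
  else if x = 7 ∧ y = 7 then true
  else false

def isC (x y : Int) : Bool :=
  if y = 0 ∧ (x = 1 ∨ x = 6) then true
  else if y = 1 ∧ (x = 0 ∨ x = 7) then true
  else if y = 6 ∧ (x = 0 ∨ x = 7) then true
  else if y = 7 ∧ (x = 1 ∨ x = 6) then true
  else false

def isX (x y : Int) : Bool :=
  if y = 1 ∧ (x = 1 ∨ x = 6) then true
  else if y = 6 ∧ (x = 1 ∨ x = 6) then true
  else false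

-- the loop body: state = (corners, cs, xs, others), appended to as in A
def stepA (st : List (Int × Int) × List (Int × Int) × List (Int × Int) × List (Int × Int))
    (m : Int × Int) :
    List (Int × Int) × List (Int × Int) × List (Int × Int) × List (Int × Int) :=
  if isCorner m.1 m.2 then (st.1 ++ [(m.1, m.2)], st.2.1, st.2.2.1, st.2.2.2)
  else if isC m.1 m.2 then (st.1, st.2.1 ++ [(m.1, m.2)], st.2.2.1, st.2.2.2)
  else if isX m.1 m.2 then (st.1, st.2.1, st.2.2.1 ++ [(m.1, m.2)], st.2.2.2)
  else (st.1, st.2.1, st.2.2.1, st.2.2.2 ++ [(m.1, m.2)])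

def reorderMoves (moves_ordered : List (Int × Int)) : List (Int × Int) :=
  let st := moves_ordered.foldl stepA ([], [], [], [])
  -- corners.extend(others); corners.extend(cs); corners.extend(xs); return corners
  st.1 ++ st.2.2.2 ++ st.2.1 ++ st.2.2.1

-- ===== PORT B =====
def prio (m : Int × Int) : Int :=
  if (m.1 = 0 ∨ m.1 = 7) ∧ (m.2 = 0 ∨ m.2 = 7) then 0
  else if ((m.1 = 1 ∨ m.1 = 6) ∧ (m.2 = 0 ∨ m.2 = 7)) ∨ ((m.1 = 0 ∨ m.1 = 7) ∧ (m.2 = 1 ∨ m.2 = 6)) then 2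
  else if (m.1 = 1 ∨ m.1 = 6) ∧ (m.2 = 1 ∨ m.2 = 6) then 3
  else 1

def reorderMoves_alt (moves_ordered : List (Int × Int)) : List (Int × Int) :=
  PySem.List.sorted (moves_ordered.map (fun m => (m.1, m.2))) prio false

-- ===== PRECONDITION & SPEC =====
def Spec_reorderMoves (moves_ordered : List (Int × Int)) (out : List (Int × Int)) : Prop := out = reorderMoves_alt moves_ordered
instance (moves_ordered : List (Int × Int)) (out : List (Int × Int)) : Decidable (Spec_reorderMoves moves_ordered out) := by unfold Spec_reorderMoves; infer_instance

-- ===== CLAIM (what is proved, stated in full; the proofs are below) =====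
def Claim_equal_reorderMoves : Prop := ∀ (moves_ordered : List (Int × Int)), Dom_reorderMoves moves_ordered → Spec_reorderMoves moves_ordered (reorderMoves moves_ordered)

-- ===== LEMMAS AND PROOFS =====

-- the four priority buckets, as filters
def F (i : Int) (xs : List (Int × Int)) : List (Int × Int) := xs.filter (fun m => prio m = i)

theorem prio_of_corner (m : Int × Int) (h : isCorner m.1 m.2 = true) : prio m = 0 := by
  unfold isCorner at h; unfold prio
  split_ifs at h ⊢ with h1 h2 h3 h4 <;> simp_all

theorem prio_of_c (m : Int × Int) (h : isC m.1 m.2 = true) : prio m = 2 := by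
  unfold isC at h; unfold prio
  split_ifs at h ⊢ <;> simp_all <;> omega

theorem prio_of_x (m : Int × Int) (hc : isCorner m.1 m.2 = false) (h : isX m.1 m.2 = true) :
    prio m = 3 := by
  unfold isCorner at hc; unfold isX at h; unfold prio
  split_ifs at hc h ⊢ <;> simp_all <;> omega

theorem prio_of_other (m : Int × Int) (h0 : isCorner m.1 m.2 = false) (h2 : isC m.1 m.2 = false)
    (h3 : isX m.1 m.2 = false) : prio m = 1 := by
  unfold isCorner at h0; unfold isC at h2; unfold isX at h3; unfold prio
  split_ifs at h0 h2 h3 ⊢ <;> simp_all <;> omega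

theorem prio_cases (m : Int × Int) : prio m = 0 ∨ prio m = 1 ∨ prio m = 2 ∨ prio m = 3 := by
  unfold prio; split_ifs <;> simp

theorem F_append_single (i : Int) (xs : List (Int × Int)) (x : Int × Int) :
    F i (xs ++ [x]) = F i xs ++ (if prio x = i then [x] else []) := by
  simp [F, List.filter_append]; split_ifs <;> simp_all

theorem mem_F (i : Int) (xs : List (Int × Int)) (y : Int × Int) (h : y ∈ F i xs) : prio y = i := by
  simp [F] at h; exact h.2

-- A's loop computes the four buckets (invariant over the accumulators)
theorem loopA (moves : List (Int × Int)) :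
    ∀ c cs xs o, moves.foldl stepA (c, cs, xs, o) =
      (c ++ F 0 moves, cs ++ F 2 moves, xs ++ F 3 moves, o ++ F 1 moves) := by
  induction moves with
  | nil => intro c cs xs o; simp [F]
  | cons m t ih =>
    intro c cs xs o
    have hF : ∀ i : Int, F i (m :: t) = (if prio m = i then [m] else []) ++ F i t := by
      intro i; simp [F, List.filter_cons]; split_ifs <;> simp_all
    simp only [List.foldl_cons, stepA]
    rcases hcor : isCorner m.1 m.2 with _ | _
    · rcases hc : isC m.1 m.2 with _ | _
      · rcases hx : isX m.1 m.2 with _ | _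
        · have hp := prio_of_other m hcor hc hx
          simp [ih, hF, hp]
        · have hp := prio_of_x m hcor hx
          simp [ih, hF, hp]
      · have hp := prio_of_c m hc
        simp [ih, hF, hp]
    · have hp := prio_of_corner m hcor
      simp [ih, hF, hp]

-- insertBy skips a prefix it does not go before
theorem insertBy_append_not_before (before : (Int × Int) → (Int × Int) → Bool) (x : Int × Int)
    (l1 l2 : List (Int × Int)) (h : ∀ y ∈ l1, before x y = false) :
    PySem.List.insertBy before x (l1 ++ l2) = l1 ++ PySem.List.insertBy before x l2 := by
  induction l1 with
  | nil => simp
  | cons y ys ih =>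
    have hy : before x y = false := h y (by simp)
    simp only [List.cons_append, PySem.List.insertBy, hy]
    simp [ih (fun z hz => h z (by simp [hz]))]

-- insertBy drops in front of a suffix it goes before everywhere
theorem insertBy_all_before (before : (Int × Int) → (Int × Int) → Bool) (x : Int × Int)
    (l2 : List (Int × Int)) (h : ∀ y ∈ l2, before x y = true) :
    PySem.List.insertBy before x l2 = x :: l2 := by
  cases l2 with
  | nil => rfl
  | cons y ys => simp [PySem.List.insertBy, h y (by simp)]

-- the stable sort by prio is exactly the bucket concatenation
theorem sorted_buckets (moves : List (Int × Int)) :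
    PySem.List.sorted moves prio false = F 0 moves ++ F 1 moves ++ F 2 moves ++ F 3 moves := by
  induction moves using List.reverseRecOn with
  | nil => simp [PySem.List.sorted, F]
  | append_singleton t x ih =>
    have hsorted : PySem.List.sorted (t ++ [x]) prio false =
        PySem.List.insertBy (fun a b => decide (prio a < prio b)) x
          (PySem.List.sorted t prio false) := by
      rw [PySem.List.sorted_eq_foldl_insertBy, PySem.List.sorted_eq_foldl_insertBy,
        List.foldl_append]
      rfl
    have hlt : ∀ (i : Int) (y : Int × Int), y ∈ F i t → prio x < prio y →
        (fun a b => decide (prio a < prio b)) x y = true := by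
      intro i y hy h; simpa using h
    have hge : ∀ (i : Int) (y : Int × Int), y ∈ F i t → ¬ prio x < prio y →
        (fun a b => decide (prio a < prio b)) x y = false := by
      intro i y hy h; simpa using h
    rw [hsorted, ih]
    rcases prio_cases x with hp | hp | hp | hp
    · -- goes right after bucket 0
      rw [show F 0 t ++ F 1 t ++ F 2 t ++ F 3 t = F 0 t ++ (F 1 t ++ F 2 t ++ F 3 t) by simp,
        insertBy_append_not_before _ _ _ _ (by
          intro y hy; exact hge 0 y hy (by rw [mem_F 0 t y hy, hp]; omega)),
        insertBy_all_before _ _ _ (by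
          intro y hy
          simp only [List.mem_append] at hy
          rcases hy with (hy | hy) | hy
          · exact hlt 1 y hy (by rw [mem_F 1 t y hy, hp]; omega)
          · exact hlt 2 y hy (by rw [mem_F 2 t y hy, hp]; omega)
          · exact hlt 3 y hy (by rw [mem_F 3 t y hy, hp]; omega))]
      simp [F_append_single, hp]
    · rw [show F 0 t ++ F 1 t ++ F 2 t ++ F 3 t = (F 0 t ++ F 1 t) ++ (F 2 t ++ F 3 t) by simp,
        insertBy_append_not_before _ _ _ _ (by
          intro y hy
          simp only [List.mem_append] at hy
          rcases hy with hy | hy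
          · exact hge 0 y hy (by rw [mem_F 0 t y hy, hp]; omega)
          · exact hge 1 y hy (by rw [mem_F 1 t y hy, hp]; omega)),
        insertBy_all_before _ _ _ (by
          intro y hy
          simp only [List.mem_append] at hy
          rcases hy with hy | hy
          · exact hlt 2 y hy (by rw [mem_F 2 t y hy, hp]; omega)
          · exact hlt 3 y hy (by rw [mem_F 3 t y hy, hp]; omega))]
      simp [F_append_single, hp]
    · rw [show F 0 t ++ F 1 t ++ F 2 t ++ F 3 t = (F 0 t ++ F 1 t ++ F 2 t) ++ F 3 t by simp,
        insertBy_append_not_before _ _ _ _ (by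
          intro y hy
          simp only [List.mem_append] at hy
          rcases hy with (hy | hy) | hy
          · exact hge 0 y hy (by rw [mem_F 0 t y hy, hp]; omega)
          · exact hge 1 y hy (by rw [mem_F 1 t y hy, hp]; omega)
          · exact hge 2 y hy (by rw [mem_F 2 t y hy, hp]; omega)),
        insertBy_all_before _ _ _ (by
          intro y hy; exact hlt 3 y hy (by rw [mem_F 3 t y hy, hp]; omega))]
      simp [F_append_single, hp]
    · rw [show F 0 t ++ F 1 t ++ F 2 t ++ F 3 t = (F 0 t ++ F 1 t ++ F 2 t ++ F 3 t) ++ [] by simp,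
        insertBy_append_not_before _ _ _ _ (by
          intro y hy
          simp only [List.mem_append] at hy
          rcases hy with ((hy | hy) | hy) | hy
          · exact hge 0 y hy (by rw [mem_F 0 t y hy, hp]; omega)
          · exact hge 1 y hy (by rw [mem_F 1 t y hy, hp]; omega)
          · exact hge 2 y hy (by rw [mem_F 2 t y hy, hp]; omega)
          · exact hge 3 y hy (by rw [mem_F 3 t y hy, hp]; omega))]
      simp [PySem.List.insertBy, F_append_single, hp]

-- ===== VERDICT (by name: the statement is the Claim_ definition above) =====
theorem reorderMoves_spec : Claim_equal_reorderMoves := by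
  intro moves _
  unfold Spec_reorderMoves reorderMoves reorderMoves_alt
  simp only [loopA, List.nil_append]
  rw [show moves.map (fun m => (m.1, m.2)) = moves by simp, sorted_buckets]
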